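-- pv_equiv track=rewrite | github.com/sethomosh/unioss | backend/modules/performance.py | _find_key_and_val
-- ===== SOURCE A (Python) =====
-- def _find_key_and_val(vals: dict, oid: str):
--     """
--     Robust lookup: exact match, longest suffix match, then last token fallback.
--     Returns (key, val) or (None, None) if not found.
--     """
--     if not vals:
--         return None, None
--     if oid in vals:
--         return oid, vals[oid]
--     oid_parts = oid.split('.')
--     for n in range(len(oid_parts), 0, -1):
--         suffix = '.'.join(oid_parts[-n:])
--         for k, v in vals.items():
--             if k.endswith(suffix):
--                 return k, v
--     last_token = oid_parts[-1]
--     for k, v in vals.items():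
--         if k.endswith(last_token):
--             return k, v
--     return None, None
-- ===== SOURCE B (Python) =====
-- def _find_key_and_val(vals: dict, oid: str):
--     """
--     Single pass over the dict: for each key compute how many trailing
--     dot-separated tokens of oid it matches (suffixes checked shortest-first,
--     stopping at the first failure), and keep the first key with the highest
--     count.  The original's n-major rescan of all keys per suffix level -- and
--     its dead last-token fallback (identical to the 1-token suffix check) --
--     disappear.
--     """
--     if oid in vals:
--         return oid, vals[oid]
--     parts = oid.split('.')
--     suffixes = []
--     acc = None
--     for p in reversed(parts):
--         acc = p if acc is None else p + '.' + acc
--         suffixes.append(acc)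
--     best_n, best_k, best_v = 0, None, None
--     for k, v in vals.items():
--         m = 0
--         while m < len(suffixes) and k.endswith(suffixes[m]):
--             m += 1
--         if best_n < m:
--             best_n, best_k, best_v = m, k, v
--     return best_k, best_v
-- ===== Notes on version B (the rewrite author's own statement) =====
-- stated objective: alternative
-- what changed: Key-major single pass replacing A's suffix-major rescan: B precomputes the suffix chain once (built incrementally back-to-front), gives every key a match depth via a shortest-first scan that stops at the first failure, and keeps the first key of maximal depth; A's dead last-token fallback (identical to its 1-token suffix pass) disappears.
import Mathlib
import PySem

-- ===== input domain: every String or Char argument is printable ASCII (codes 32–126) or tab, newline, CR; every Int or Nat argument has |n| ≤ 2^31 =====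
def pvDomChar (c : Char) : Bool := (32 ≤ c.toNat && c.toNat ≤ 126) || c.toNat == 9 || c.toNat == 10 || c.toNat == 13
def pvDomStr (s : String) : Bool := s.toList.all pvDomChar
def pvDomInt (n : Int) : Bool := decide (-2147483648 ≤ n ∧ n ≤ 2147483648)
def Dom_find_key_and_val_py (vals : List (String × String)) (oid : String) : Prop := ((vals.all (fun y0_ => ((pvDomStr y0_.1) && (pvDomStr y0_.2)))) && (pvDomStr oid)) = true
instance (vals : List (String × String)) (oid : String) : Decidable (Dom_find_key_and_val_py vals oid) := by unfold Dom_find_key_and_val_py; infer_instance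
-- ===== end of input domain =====

-- B replaces A's suffix-major rescan of all keys per suffix level by one key-major pass
-- (each key gets a match depth, first key of maximal depth wins) and drops A's dead
-- last-token fallback; same return value, alternative algorithm.

-- ===== PORT A =====
-- inner 'for k, v in vals.items(): if k.endswith(suffix): return k, v'
def pvAFind (items : List (String × String)) (suffix : String) : Option (String × String) :=
  items.find? (fun p => PySem.Str.endswith p.1 suffix)

-- 'for n in range(len(oid_parts), 0, -1)' — the argument is the current n
def pvALoop (items : List (String × String)) (parts : List String) : Nat → Option (String × String)
  | 0 => none
  | n + 1 =>
    match pvAFind items (PySem.Str.join "." (PySem.List.slice parts (some (-((n + 1 : Nat) : Int))) none)) with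
    | some p => some p
    | none => pvALoop items parts n

def find_key_and_val_py (vals : List (String × String)) (oid : String) : Option String × Option String :=
  let d := PySem.Dict.ofList vals
  if d.items = [] then (none, none)
  else
    match d.get? oid with
    | some v => (some oid, some v)
    | none =>
      -- oid.split('.'): sep "." is nonempty, split? never returns none
      let parts := (PySem.Str.split? oid ".").getD []
      match pvALoop d.items parts parts.length with
      | some (k, v) => (some k, some v)
      | none =>
        -- last_token = oid_parts[-1]; parts is never [] so the default is unreachable
        match pvAFind d.items ((PySem.List.pyGet? parts (-1)).getD "") with
        | some (k, v) => (some k, some v)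
        | none => (none, none)

-- ===== PORT B =====
-- suffixes built incrementally over reversed(parts): suffixes[i] = '.'.join(parts[-(i+1):])
def pvBSuffixes : List String → Option String → List String → List String
  | [], _, out => out
  | p :: rest, acc, out =>
    let a := match acc with | none => p | some s => p ++ "." ++ s
    pvBSuffixes rest (some a) (out ++ [a])

-- the while loop: length of the leading run of suffixes that k ends with
def pvBLevel (k : String) : List String → Nat
  | [] => 0
  | s :: rest => if PySem.Str.endswith k s then pvBLevel k rest + 1 else 0

-- 'for k, v in vals.items()' tracking the first key of maximal depth
def pvBLoop (suffixes : List String) :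
    List (String × String) → Nat → Option String × Option String → Option String × Option String
  | [], _, best => best
  | (k, v) :: rest, bestN, best =>
    let m := pvBLevel k suffixes
    if bestN < m then pvBLoop suffixes rest m (some k, some v)
    else pvBLoop suffixes rest bestN best

def find_key_and_val_py_alt (vals : List (String × String)) (oid : String) : Option String × Option String :=
  let d := PySem.Dict.ofList vals
  match d.get? oid with
  | some v => (some oid, some v)
  | none =>
    let parts := (PySem.Str.split? oid ".").getD []
    pvBLoop (pvBSuffixes parts.reverse none []) d.items 0 (none, none)

-- ===== PRECONDITION & SPEC =====
def Spec_find_key_and_val_py (vals : List (String × String)) (oid : String) (out : Option String × Option String) : Prop := out = find_key_and_val_py_alt vals oid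
instance (vals : List (String × String)) (oid : String) (out : Option String × Option String) : Decidable (Spec_find_key_and_val_py vals oid out) := by unfold Spec_find_key_and_val_py; infer_instance

-- ===== CLAIM (what is proved, stated in full; the proofs are below) =====
def Claim_equal_find_key_and_val_py : Prop := ∀ (vals : List (String × String)) (oid : String), Dom_find_key_and_val_py vals oid → Spec_find_key_and_val_py vals oid (find_key_and_val_py vals oid)

-- ===== LEMMAS AND PROOFS =====

-- string equality via toList
theorem pvStrExt {s t : String} (h : s.toList = t.toList) : s = t := by
  have := congrArg String.ofList h
  simpa [String.ofList_toList] using this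

theorem pvJoin_singleton (a : String) : PySem.Str.join "." [a] = a := by
  apply pvStrExt
  simp [PySem.Str.join, PySem.Chars.join_singleton]

theorem pvJoin_cons (a : String) (l : List String) (h : l ≠ []) :
    PySem.Str.join "." (a :: l) = a ++ "." ++ PySem.Str.join "." l := by
  obtain ⟨b, rest, rfl⟩ := List.exists_cons_of_ne_nil h
  apply pvStrExt
  simp [PySem.Str.join, PySem.Chars.join_cons_cons, String.toList_append]

-- the dot-suffix chain: dropping one more part leaves a string suffix
theorem pvSfx_succ (parts : List String) (j : Nat) (h : j + 1 < parts.length) :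
    PySem.Str.join "." (parts.drop j) =
      parts[j]'(by omega) ++ "." ++ PySem.Str.join "." (parts.drop (j + 1)) := by
  rw [List.drop_eq_getElem_cons (by omega : j < parts.length)]
  apply pvJoin_cons
  intro hc
  have := List.drop_eq_nil_iff.mp hc
  omega

theorem pvSfx_suffix (parts : List String) (j : Nat) (h : j + 1 < parts.length) :
    (PySem.Str.join "." (parts.drop (j + 1))).toList <:+ (PySem.Str.join "." (parts.drop j)).toList := by
  rw [pvSfx_succ parts j h]
  exact ⟨(parts[j]'(by omega)).toList ++ ['.'], by simp [String.toList_append]⟩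

theorem pvBSuffixes_some (l : List String) : ∀ (acc : List String), acc ≠ [] → ∀ (out : List String),
    pvBSuffixes l (some (PySem.Str.join "." acc)) out
      = out ++ (List.range l.length).map (fun i => PySem.Str.join "." ((l.take (i + 1)).reverse ++ acc)) := by
  induction l with
  | nil => intro acc _ out; simp [pvBSuffixes]
  | cons p rest ih =>
    intro acc hacc out
    show pvBSuffixes rest (some (p ++ "." ++ PySem.Str.join "." acc))
        (out ++ [p ++ "." ++ PySem.Str.join "." acc]) = _
    rw [← pvJoin_cons p acc hacc]
    rw [ih (p :: acc) (by simp) (out ++ [PySem.Str.join "." (p :: acc)])]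
    simp only [List.length_cons, List.range_succ_eq_map, List.map_cons, List.map_map,
      List.take_succ_cons, List.take_zero, List.reverse_cons, List.reverse_nil,
      List.nil_append, List.singleton_append, List.append_assoc]
    rfl

theorem pvBSuffixes_spec (parts : List String) (h : parts ≠ []) :
    pvBSuffixes parts.reverse none [] =
      (List.range parts.length).map (fun i => PySem.Str.join "." (parts.drop (parts.length - 1 - i))) := by
  rcases List.eq_nil_or_concat parts with rfl | ⟨q, a, rfl⟩
  · exact absurd rfl h
  · simp only [List.concat_eq_append]
    have h1 : (q ++ [a]).reverse = a :: q.reverse := by simp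
    rw [h1]
    have h2 : pvBSuffixes (a :: q.reverse) none [] = pvBSuffixes q.reverse (some a) [a] := by
      simp [pvBSuffixes]
    rw [h2]
    have h3 := pvBSuffixes_some q.reverse [a] (by simp) [a]
    rw [pvJoin_singleton] at h3
    rw [h3]
    have hlen : (q ++ [a]).length = q.length + 1 := by simp
    rw [hlen, List.range_succ_eq_map]
    simp only [List.map_cons, List.map_map, List.length_reverse, List.singleton_append]
    congr 1
    · have e0 : q.length + 1 - 1 - 0 = q.length := by omega
      rw [e0, List.drop_left, pvJoin_singleton]
    · apply List.map_congr_left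
      intro i hi
      have hi' : i < q.length := List.mem_range.mp hi
      simp only [Function.comp_apply]
      rw [List.take_reverse, List.reverse_reverse]
      have e2 : q.length + 1 - 1 - Nat.succ i = q.length - 1 - i := by omega
      rw [e2]
      have e3 : (q ++ [a]).drop (q.length - 1 - i) = q.drop (q.length - 1 - i) ++ [a] :=
        List.drop_append_of_le_length (by omega)
      rw [e3]
      have e4 : q.length - (i + 1) = q.length - 1 - i := by omega
      rw [e4]

theorem pvBLevel_le (k : String) (S : List String) : pvBLevel k S ≤ S.length := by
  induction S with
  | nil => simp [pvBLevel]
  | cons s rest ih =>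
    simp only [pvBLevel, List.length_cons]
    split <;> omega

-- with a monotone chain of suffixes, the while-count characterises every match
theorem pvBLevel_iff (k : String) (S : List String)
    (hmono : ∀ (i : Nat) (s t : String), S[i]? = some s → S[i + 1]? = some t →
      PySem.Str.endswith k t = true → PySem.Str.endswith k s = true) :
    ∀ (i : Nat) (s : String), S[i]? = some s →
      (PySem.Str.endswith k s = true ↔ i < pvBLevel k S) := by
  induction S with
  | nil => intro i s hs; simp at hs
  | cons s0 rest ih =>
    have hmono' : ∀ (j : Nat) (s t : String), rest[j]? = some s → rest[j + 1]? = some t →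
        PySem.Str.endswith k t = true → PySem.Str.endswith k s = true := by
      intro j s t h1 h2 he
      exact hmono (j + 1) s t (by simpa using h1) (by simpa using h2) he
    intro i s hs
    cases i with
    | zero =>
      simp only [List.getElem?_cons_zero, Option.some.injEq] at hs
      subst hs
      simp only [pvBLevel]
      cases h0 : PySem.Str.endswith k s0 with
      | true => simp
      | false => simp
    | succ i =>
      have hs' : rest[i]? = some s := by simpa using hs
      have hiff := ih hmono' i s hs'
      by_cases h0 : PySem.Str.endswith k s0 = true
      · simp only [pvBLevel, if_pos h0]
        rw [hiff]
        omega
      · simp only [pvBLevel, if_neg h0]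
        constructor
        · intro he
          exfalso
          have hlen : i < rest.length := (List.getElem?_eq_some_iff.mp hs').1
          have h0lt : 0 < rest.length := by omega
          have ht : rest[0]? = some (rest[0]'h0lt) := List.getElem?_eq_getElem h0lt
          have h0iff := ih hmono' 0 _ ht
          have hilt : i < pvBLevel k rest := hiff.mp he
          have hr0 : PySem.Str.endswith k (rest[0]'h0lt) = true := h0iff.mpr (by omega)
          exact h0 (hmono 0 s0 _ (by simp) (by simp) hr0)
        · intro hcon; omega

-- max depth over the items, and the two loops against it
def pvM (lvl : String → Nat) (items : List (String × String)) : Nat :=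
  items.foldr (fun p m => max (lvl p.1) m) 0

theorem pvLe_M (lvl : String → Nat) (items : List (String × String)) :
    ∀ p ∈ items, lvl p.1 ≤ pvM lvl items := by
  induction items with
  | nil => simp
  | cons q rest ih =>
    intro p hp
    simp only [pvM, List.foldr_cons]
    rcases List.mem_cons.mp hp with rfl | h
    · omega
    · have := ih p h
      simp only [pvM] at this
      omega

theorem pvM_le (lvl : String → Nat) (items : List (String × String)) (c : Nat)
    (h : ∀ p ∈ items, lvl p.1 ≤ c) : pvM lvl items ≤ c := by
  induction items with
  | nil => simp [pvM]
  | cons q rest ih =>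
    have h1 := h q (by simp)
    have h2 : pvM lvl rest ≤ c := ih (fun p hp => h p (by simp [hp]))
    simp only [pvM, List.foldr_cons] at *
    omega

theorem pvM_attain (lvl : String → Nat) (items : List (String × String)) (h : pvM lvl items ≠ 0) :
    ∃ p ∈ items, lvl p.1 = pvM lvl items := by
  induction items with
  | nil => simp [pvM] at h
  | cons q rest ih =>
    simp only [pvM, List.foldr_cons] at h ⊢
    rcases Nat.le_total (rest.foldr (fun p m => max (lvl p.1) m) 0) (lvl q.1) with hle | hle
    · exact ⟨q, by simp, by omega⟩
    · have hne : pvM lvl rest ≠ 0 := by simp only [pvM]; omega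
      obtain ⟨p, hp, hpe⟩ := ih hne
      simp only [pvM] at hpe
      exact ⟨p, by simp [hp], by omega⟩

theorem pvFind?_congr {α : Type} (l : List α) (p q : α → Bool) (h : ∀ x ∈ l, p x = q x) :
    l.find? p = l.find? q := by
  induction l with
  | nil => rfl
  | cons a t ih =>
    have ha := h a (by simp)
    have iht := ih (fun x hx => h x (by simp [hx]))
    by_cases hq : q a = true
    · rw [List.find?_cons_of_pos (by rw [ha]; exact hq), List.find?_cons_of_pos hq]
    · rw [List.find?_cons_of_neg (by rw [ha]; exact hq), List.find?_cons_of_neg hq]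
      exact iht

def pvAGen (items : List (String × String)) (lvl : String → Nat) : Nat → Option (String × String)
  | 0 => none
  | n + 1 =>
    match items.find? (fun p => decide (n + 1 ≤ lvl p.1)) with
    | some p => some p
    | none => pvAGen items lvl n

theorem pvAGen_spec (items : List (String × String)) (lvl : String → Nat) :
    ∀ n, pvM lvl items ≤ n →
      pvAGen items lvl n =
        if pvM lvl items = 0 then none
        else items.find? (fun p => decide (lvl p.1 = pvM lvl items)) := by
  intro n
  induction n with
  | zero =>
    intro h
    have h0 : pvM lvl items = 0 := by omega
    simp [pvAGen, h0]
  | succ n ih =>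
    intro h
    by_cases hM : pvM lvl items = n + 1
    · have hfeq : items.find? (fun p => decide (n + 1 ≤ lvl p.1))
          = items.find? (fun p => decide (lvl p.1 = pvM lvl items)) := by
        apply pvFind?_congr
        intro p hp
        rw [decide_eq_decide]
        have := pvLe_M lvl items p hp
        omega
      simp only [pvAGen, hfeq]
      cases hfind : items.find? (fun p => decide (lvl p.1 = pvM lvl items)) with
      | some p => rw [if_neg (by omega)]
      | none =>
        exfalso
        obtain ⟨p, hp, hpe⟩ := pvM_attain lvl items (by omega)
        exact (List.find?_eq_none.mp hfind p hp) (by simp [hpe])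
    · have hnone : items.find? (fun p => decide (n + 1 ≤ lvl p.1)) = none := by
        apply List.find?_eq_none.mpr
        intro p hp
        have := pvLe_M lvl items p hp
        simp
        omega
      simp only [pvAGen, hnone]
      exact ih (by omega)

theorem pvBLoop_le (S : List String) (items : List (String × String)) :
    ∀ (b : Nat) (acc : Option String × Option String),
      pvM (fun k => pvBLevel k S) items ≤ b → pvBLoop S items b acc = acc := by
  induction items with
  | nil => intro b acc _; rfl
  | cons q rest ih =>
    intro b acc hb
    obtain ⟨k, v⟩ := q
    simp only [pvM, List.foldr_cons] at hb
    simp only [pvBLoop]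
    rw [if_neg (by omega)]
    apply ih
    simp only [pvM]
    omega

theorem pvBLoop_find (S : List String) (items : List (String × String)) :
    ∀ (b : Nat) (acc : Option String × Option String) (k v : String),
      b < pvM (fun k => pvBLevel k S) items →
      items.find? (fun p => decide (pvBLevel p.1 S = pvM (fun k => pvBLevel k S) items)) = some (k, v) →
      pvBLoop S items b acc = (some k, some v) := by
  induction items with
  | nil => intro b acc k v hb _; simp [pvM] at hb
  | cons q rest ih =>
    intro b acc k v hb hfind
    obtain ⟨k0, v0⟩ := q
    have hMcons : pvM (fun k => pvBLevel k S) ((k0, v0) :: rest)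
        = max (pvBLevel k0 S) (pvM (fun k => pvBLevel k S) rest) := rfl
    by_cases hex : pvBLevel k0 S = pvM (fun k => pvBLevel k S) ((k0, v0) :: rest)
    · rw [List.find?_cons_of_pos (by simp [hex])] at hfind
      simp only [Option.some.injEq, Prod.mk.injEq] at hfind
      obtain ⟨rfl, rfl⟩ := hfind
      simp only [pvBLoop]
      rw [if_pos (by omega)]
      apply pvBLoop_le
      have h2 := Nat.le_max_right (pvBLevel k0 S) (pvM (fun k => pvBLevel k S) rest)
      omega
    · have hhead := Nat.le_max_left (pvBLevel k0 S) (pvM (fun k => pvBLevel k S) rest)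
      rw [← hMcons] at hhead
      have hlt : pvBLevel k0 S < pvM (fun k => pvBLevel k S) ((k0, v0) :: rest) := by omega
      have hMrest : pvM (fun k => pvBLevel k S) rest = pvM (fun k => pvBLevel k S) ((k0, v0) :: rest) := by
        rcases Nat.le_total (pvBLevel k0 S) (pvM (fun k => pvBLevel k S) rest) with hcase | hcase
        · rw [hMcons, Nat.max_eq_right hcase]
        · exfalso
          rw [hMcons, Nat.max_eq_left hcase] at hlt
          omega
      rw [List.find?_cons_of_neg (by simp [hex])] at hfind
      simp only [← hMrest] at hfind
      simp only [pvBLoop]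
      by_cases hbm : b < pvBLevel k0 S
      · rw [if_pos hbm]
        exact ih (pvBLevel k0 S) (some k0, some v0) k v (by omega) hfind
      · rw [if_neg hbm]
        exact ih b acc k v (by omega) hfind

-- '.'-split is never empty: the worker of splitOn always appends at least one piece
theorem pvGoLen (sep : List Char) : ∀ (fuel : Nat) (l cur : List Char) (acc : List (List Char)),
    acc.length + 1 ≤ (PySem.Chars.splitOn.go sep fuel l cur acc).length := by
  intro fuel
  induction fuel with
  | zero => intro l cur acc; simp [PySem.Chars.splitOn.go]
  | succ fuel ih =>
    intro l cur acc
    cases l with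
    | nil => simp [PySem.Chars.splitOn.go]
    | cons c rest =>
      rw [PySem.Chars.splitOn.go]
      split
      · have := ih (List.drop sep.length (c :: rest)) [] (cur.reverse :: acc)
        simp only [List.length_cons] at this
        omega
      · exact ih rest (c :: cur) acc

theorem pvSplitDot_ne_nil (s : String) : (PySem.Str.split? s ".").getD [] ≠ [] := by
  have hgo := pvGoLen (".".toList) (s.toList.length + 1) s.toList [] []
  have hsplit : PySem.Str.split? s "." = some ((PySem.Chars.splitOn s.toList (".".toList)).map String.ofList) := by
    rw [PySem.Str.split?, PySem.Chars.split?, if_neg (by decide)]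
    rfl
  rw [hsplit]
  simp only [Option.getD_some, ne_eq, List.map_eq_nil_iff]
  intro h
  rw [PySem.Chars.splitOn] at h
  have := congrArg List.length h
  simp only [List.length_nil] at this
  omega

-- last token: oid_parts[-1] is the 1-part suffix
theorem pvLast_eq (parts : List String) (h : parts ≠ []) :
    (PySem.List.pyGet? parts (-1)).getD "" = PySem.Str.join "." (parts.drop (parts.length - 1)) := by
  rcases List.eq_nil_or_concat parts with rfl | ⟨q, a, rfl⟩
  · exact absurd rfl h
  · simp only [List.concat_eq_append]
    rw [PySem.List.pyGet?_neg_one, List.getLast?_concat]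
    have e : (q ++ [a]).length - 1 = q.length := by simp
    rw [e, List.drop_left, pvJoin_singleton]
    rfl

-- the heart: A's suffix-major scan and B's key-major argmax pass agree
theorem pvMain (its : List (String × String)) (parts : List String) (hpne : parts ≠ []) :
    (pvALoop its parts parts.length = none →
      pvAFind its ((PySem.List.pyGet? parts (-1)).getD "") = none ∧
      pvBLoop (pvBSuffixes parts.reverse none []) its 0 (none, none) = (none, none))
    ∧ (∀ k v, pvALoop its parts parts.length = some (k, v) →
      pvBLoop (pvBSuffixes parts.reverse none []) its 0 (none, none) = (some k, some v)) := by
  set S := pvBSuffixes parts.reverse none [] with hS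
  have hSspec := pvBSuffixes_spec parts hpne
  have hSlen : S.length = parts.length := by rw [hS, hSspec]; simp
  have hSget : ∀ i, i < parts.length →
      S[i]? = some (PySem.Str.join "." (parts.drop (parts.length - 1 - i))) := by
    intro i hi
    rw [hS, hSspec, List.getElem?_map, List.getElem?_range hi]
    rfl
  have hmono : ∀ (k : String) (i : Nat) (s t : String), S[i]? = some s → S[i + 1]? = some t →
      PySem.Str.endswith k t = true → PySem.Str.endswith k s = true := by
    intro k i s t h1 h2 he
    have hi1 : i + 1 < S.length := (List.getElem?_eq_some_iff.mp h2).1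
    rw [hSlen] at hi1
    rw [hSget i (by omega)] at h1
    rw [hSget (i + 1) (by omega)] at h2
    injection h1 with h1
    injection h2 with h2
    subst h1; subst h2
    have hidx : parts.length - 1 - (i + 1) = parts.length - 2 - i := by omega
    have hjlt : (parts.length - 2 - i) + 1 < parts.length := by omega
    have hj1 : (parts.length - 2 - i) + 1 = parts.length - 1 - i := by omega
    have hsuf := pvSfx_suffix parts (parts.length - 2 - i) hjlt
    rw [hj1] at hsuf
    rw [PySem.Str.endswith_eq, PySem.Chars.endswith_iff] at he ⊢
    rw [hidx] at he
    exact hsuf.trans he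
  have hlvl_iff : ∀ (k : String) (n : Nat), 1 ≤ n → n ≤ parts.length →
      (PySem.Str.endswith k (PySem.Str.join "." (parts.drop (parts.length - n))) = true
        ↔ n ≤ pvBLevel k S) := by
    intro k n h1 h2
    have hidx : parts.length - 1 - (n - 1) = parts.length - n := by omega
    have hget := hSget (n - 1) (by omega)
    rw [hidx] at hget
    rw [pvBLevel_iff k S (hmono k) (n - 1) _ hget]
    omega
  have hlvl_le : ∀ k, pvBLevel k S ≤ parts.length := fun k => hSlen ▸ pvBLevel_le k S
  have hMle : pvM (fun k => pvBLevel k S) its ≤ parts.length :=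
    pvM_le _ _ _ (fun p _ => hlvl_le p.1)
  have hloop : ∀ n, n ≤ parts.length →
      pvALoop its parts n = pvAGen its (fun k => pvBLevel k S) n := by
    intro n
    induction n with
    | zero => intro _; rfl
    | succ m ih =>
      intro h
      simp only [pvALoop, pvAGen, pvAFind]
      rw [PySem.List.slice_from_neg_natCast parts (m + 1) (by omega)]
      have hfeq : (fun p : String × String =>
            PySem.Str.endswith p.1 (PySem.Str.join "." (List.drop (parts.length - (m + 1)) parts)))
          = (fun p : String × String => decide (m + 1 ≤ pvBLevel p.1 S)) := by
        funext p
        rw [Bool.eq_iff_iff, decide_eq_true_eq]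
        exact hlvl_iff p.1 (m + 1) (by omega) h
      rw [hfeq, ih (by omega)]
  have hres := pvAGen_spec its (fun k => pvBLevel k S) parts.length hMle
  constructor
  · intro hnone
    rw [hloop parts.length le_rfl, hres] at hnone
    by_cases hM0 : pvM (fun k => pvBLevel k S) its = 0
    · constructor
      · apply List.find?_eq_none.mpr
        intro p hp
        rw [pvLast_eq parts hpne]
        intro hcontra
        have h1 : 1 ≤ pvBLevel p.1 S := (hlvl_iff p.1 1 le_rfl (by
          have := List.length_pos_iff.mpr hpne
          omega)).mp hcontra
        have h2 : pvBLevel p.1 S ≤ pvM (fun k => pvBLevel k S) its :=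
          pvLe_M (fun k => pvBLevel k S) its p hp
        omega
      · exact pvBLoop_le S its 0 (none, none) (by omega)
    · exfalso
      rw [if_neg hM0] at hnone
      obtain ⟨p, hp, hpe⟩ := pvM_attain (fun k => pvBLevel k S) its hM0
      exact (List.find?_eq_none.mp hnone p hp) (by simp [hpe])
  · intro k v hsome
    rw [hloop parts.length le_rfl, hres] at hsome
    by_cases hM0 : pvM (fun k => pvBLevel k S) its = 0
    · rw [if_pos hM0] at hsome
      exact absurd hsome (by simp)
    · rw [if_neg hM0] at hsome
      exact pvBLoop_find S its 0 (none, none) k v (by omega) hsome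

-- ===== VERDICT (by name: the statement is the Claim_ definition above) =====
theorem find_key_and_val_py_spec : Claim_equal_find_key_and_val_py := by
  intro vals oid _
  unfold Spec_find_key_and_val_py
  by_cases hemp : (PySem.Dict.ofList vals).items = []
  · have hget : (PySem.Dict.ofList vals).get? oid = none := by
      rw [PySem.Dict.get?_eq_none_iff_not_mem_keys]
      simp [PySem.Dict.keys, hemp]
    simp only [find_key_and_val_py, find_key_and_val_py_alt, hemp, hget, if_pos, pvBLoop]
  · cases hget : (PySem.Dict.ofList vals).get? oid with
    | some v =>
      simp only [find_key_and_val_py, find_key_and_val_py_alt, hget, if_neg hemp]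
    | none =>
      simp only [find_key_and_val_py, find_key_and_val_py_alt, hget, if_neg hemp]
      have hpne := pvSplitDot_ne_nil oid
      have hmain := pvMain (PySem.Dict.ofList vals).items ((PySem.Str.split? oid ".").getD []) hpne
      cases hres : pvALoop (PySem.Dict.ofList vals).items ((PySem.Str.split? oid ".").getD [])
          ((PySem.Str.split? oid ".").getD []).length with
      | some pr =>
        obtain ⟨k, v⟩ := pr
        rw [hmain.2 k v hres]
      | none =>
        obtain ⟨hfb, hB⟩ := hmain.1 hres
        rw [hfb, hB]
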